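-- pv_equiv track=rewrite | github.com/gyuhoshim/revise-ocr-correction | contaminate.py | contaminate_section
-- ===== SOURCE A (Python) =====
-- from typing import Dict, List, Tuple
--
-- def contaminate_section(lines: List[str], num_cols: int) -> str:
--     """
--     Contaminate text section by simulating multi-column OCR reading order.
--
--     Divides lines into columns and reads vertically then horizontally,
--     simulating how OCR might misread multi-column documents.
--
--     Example with num_cols=2:
--         Original lines: [A1, A2, A3, B1, B2, B3]
--         Result:         [A1 B1, A2 B2, A3 B3]
--
--     Args:
--         lines: List of text lines to contaminate
--         num_cols: Number of columns to simulate
--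
--     Returns:
--         Contaminated text as string with newlines
--     """
--     if num_cols <= 1:
--         return "\n".join(lines)
--
--     total_lines = len(lines)
--     base_count, remainder = divmod(total_lines, num_cols)
--
--     # Divide lines into columns
--     columns = []
--     start_idx = 0
--     for col_idx in range(num_cols):
--         column_size = base_count + (1 if col_idx < remainder else 0)
--         columns.append(lines[start_idx : start_idx + column_size])
--         start_idx += column_size
--
--     # Read vertically (by row) across columns
--     max_rows = max(len(col) for col in columns)
--     contaminated_lines = []
--     for row_idx in range(max_rows):
--         row_texts = [
--             col[row_idx].strip() for col in columns if row_idx < len(col)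
--         ]
--         contaminated_lines.append(" ".join(row_texts))
--
--     return "\n".join(contaminated_lines)
-- ===== SOURCE B (Python) =====
-- def contaminate_section(lines, num_cols):
--     if num_cols <= 1:
--         return "\n".join(lines)
--     base, rem = divmod(len(lines), num_cols)
--     max_rows = base + (1 if rem else 0)
--     rows = []
--     for r in range(max_rows):
--         k = num_cols if r < base else rem
--         rows.append(" ".join(lines[c * base + min(c, rem) + r].strip()
--                              for c in range(k)))
--     return "\n".join(rows)
-- ===== Notes on version B (the rewrite author's own statement) =====
-- stated objective: simpler
-- what changed: B drops A's materialized columns table and start_idx accumulator entirely: it computes each output row directly by index arithmetic (column c starts at c*base + min(c, rem), and row r draws from the first num_cols or rem columns), so no intermediate list of column slices, no max() over column lengths and no per-element membership test are needed.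
import Mathlib
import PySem

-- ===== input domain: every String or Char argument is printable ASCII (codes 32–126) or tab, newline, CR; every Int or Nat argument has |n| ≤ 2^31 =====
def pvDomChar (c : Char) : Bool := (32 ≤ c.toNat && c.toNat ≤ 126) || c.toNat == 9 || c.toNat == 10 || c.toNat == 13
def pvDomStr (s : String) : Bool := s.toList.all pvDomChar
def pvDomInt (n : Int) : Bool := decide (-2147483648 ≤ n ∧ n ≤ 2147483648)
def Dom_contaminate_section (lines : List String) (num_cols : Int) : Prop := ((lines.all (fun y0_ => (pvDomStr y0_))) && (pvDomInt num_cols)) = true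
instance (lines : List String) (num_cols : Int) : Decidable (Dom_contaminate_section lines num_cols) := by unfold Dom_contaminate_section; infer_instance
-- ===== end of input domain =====

-- B replaces A's materialized columns table (running start_idx, max() over column lengths,
-- per-row membership filter) by direct index arithmetic: column c starts at c*base + min(c, rem)
-- and row r draws from the first num_cols (or, on the last partial row, rem) columns. Objective: simpler.

-- ===== PORT A =====
-- Python A: slice lines into a columns table with a running start_idx, take max(len(col)) rows,
-- then per row filter the columns that still have a row_idx-th entry.
def contaminate_section (lines : List String) (num_cols : Int) : String :=
  if num_cols ≤ 1 then
    PySem.Str.join "\n" lines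
  else
    let total_lines : Int := PySem.List.len lines
    let base_count : Int := PySem.Int.floordiv total_lines num_cols
    let remainder : Int := PySem.Int.mod total_lines num_cols
    let st := (PySem.List.pyRange 0 num_cols 1).foldl
      (fun (st : List (List String) × Int) col_idx =>
        let column_size := base_count + (if col_idx < remainder then 1 else 0)
        (st.1 ++ [PySem.List.slice lines (some st.2) (some (st.2 + column_size))],
         st.2 + column_size))
      ([], 0)
    let columns := st.1
    let max_rows : Int := (PySem.List.max? (columns.map (fun col => (col.length : Int))) (fun x => x)).getD 0
    let contaminated_lines := (PySem.List.pyRange 0 max_rows 1).foldl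
      (fun acc row_idx =>
        acc ++ [PySem.Str.join " "
          ((columns.filter (fun col => row_idx < (col.length : Int))).map
            (fun col => PySem.Str.strip (PySem.List.pyGetD col row_idx "")))])
      []
    PySem.Str.join "\n" contaminated_lines


-- ===== PORT B =====
def contaminate_section_alt (lines : List String) (num_cols : Int) : String :=
  if num_cols ≤ 1 then
    PySem.Str.join "\n" lines
  else
    let base : Int := PySem.Int.floordiv (PySem.List.len lines) num_cols
    let rem : Int := PySem.Int.mod (PySem.List.len lines) num_cols
    let max_rows : Int := base + (if rem ≠ 0 then 1 else 0)
    let rows := (PySem.List.pyRange 0 max_rows 1).foldl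
      (fun acc r =>
        let k := if r < base then num_cols else rem
        acc ++ [PySem.Str.join " " ((PySem.List.pyRange 0 k 1).map
          (fun c => PySem.Str.strip (PySem.List.pyGetD lines (c * base + min c rem + r) "")))])
      []
    PySem.Str.join "\n" rows


-- ===== PRECONDITION & SPEC =====
def Spec_contaminate_section (lines : List String) (num_cols : Int) (out : String) : Prop := out = contaminate_section_alt lines num_cols
instance (lines : List String) (num_cols : Int) (out : String) : Decidable (Spec_contaminate_section lines num_cols out) := by unfold Spec_contaminate_section; infer_instance

-- ===== CLAIM (what is proved, stated in full; the proofs are below) =====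
def Claim_equal_contaminate_section : Prop := ∀ (lines : List String) (num_cols : Int), Dom_contaminate_section lines num_cols → Spec_contaminate_section lines num_cols (contaminate_section lines num_cols)

-- ===== LEMMAS AND PROOFS =====
theorem pvFoldA (lines : List String) (q rem : Int) (hrem : 0 ≤ rem) (m : Nat) :
    (PySem.List.pyRange 0 (m : Int) 1).foldl
      (fun (st : List (List String) × Int) col_idx =>
        (st.1 ++ [PySem.List.slice lines (some st.2) (some (st.2 + (q + (if col_idx < rem then 1 else 0))))],
         st.2 + (q + (if col_idx < rem then 1 else 0))))
      ([], 0)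
    = ((List.range m).map (fun (j : Nat) =>
          PySem.List.slice lines (some ((j : Int) * q + min (j : Int) rem))
            (some (((j : Int) + 1) * q + min ((j : Int) + 1) rem))),
       (m : Int) * q + min (m : Int) rem) := by
  induction m with
  | zero => simp [PySem.List.pyRange_one_eq_nil]; omega
  | succ k ih =>
    have hcast : (((k + 1 : Nat)) : Int) = (k : Int) + 1 := by push_cast; ring
    have hr : PySem.List.pyRange 0 (((k + 1 : Nat)) : Int) 1
        = PySem.List.pyRange 0 (k : Int) 1 ++ [(k : Int)] := by
      rw [hcast]; exact PySem.List.pyRange_one_succ_right (by positivity)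
    rw [hr, List.foldl_append, ih]
    simp only [List.foldl_cons, List.foldl_nil, List.range_succ, List.map_append, List.map_cons,
      List.map_nil, Prod.mk.injEq]
    have hmin : min ((k : Int) + 1) rem = min (k : Int) rem + (if (k : Int) < rem then 1 else 0) := by
      split_ifs <;> omega
    have e1 : (k:Int)*q + min (k:Int) rem + (q + (if (k:Int) < rem then 1 else 0))
        = ((k:Int)+1)*q + min ((k:Int)+1) rem := by rw [hmin]; ring
    rw [hcast, e1]
    exact ⟨rfl, rfl⟩

theorem pvFiltRange (n m : Nat) (h : m ≤ n) :
    (List.range n).filter (fun j => decide (j < m)) = List.range m := by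
  induction n with
  | zero => simp; omega
  | succ k ih =>
    rw [List.range_succ, List.filter_append]
    by_cases hm : m ≤ k
    · rw [ih hm]; simp; omega
    · have hm1 : m = k + 1 := by omega
      subst hm1
      rw [List.filter_eq_self.mpr (by intro a ha; simp at ha ⊢; omega)]
      simp [List.range_succ]

theorem pvCore (lines : List String) (nc q rem : Int) (h2 : 2 ≤ nc) (hq0 : 0 ≤ q)
    (hrem0 : 0 ≤ rem) (hremlt : rem < nc) (hsum : q * nc + rem = (lines.length : Int)) :
    PySem.Str.join "\n"
      (List.foldl
        (fun acc row_idx => acc ++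
          [PySem.Str.join " "
            (List.map (fun col => PySem.Str.strip (PySem.List.pyGetD col row_idx ""))
              (List.filter (fun col => decide (row_idx < (col.length : Int)))
                (List.foldl
                  (fun (st : List (List String) × Int) col_idx =>
                    (st.1 ++ [PySem.List.slice lines (some st.2) (some (st.2 + (q + if col_idx < rem then 1 else 0)))],
                     st.2 + (q + if col_idx < rem then 1 else 0)))
                  ([], 0) (PySem.List.pyRange 0 nc 1)).1))])
        []
        (PySem.List.pyRange 0
          ((PySem.List.max?
              (List.map (fun col => (col.length : Int))
                (List.foldl
                  (fun (st : List (List String) × Int) col_idx =>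
                    (st.1 ++ [PySem.List.slice lines (some st.2) (some (st.2 + (q + if col_idx < rem then 1 else 0)))],
                     st.2 + (q + if col_idx < rem then 1 else 0)))
                  ([], 0) (PySem.List.pyRange 0 nc 1)).1)
              (fun x => x)).getD 0) 1))
    = PySem.Str.join "\n"
      (List.foldl
        (fun acc r => acc ++
          [PySem.Str.join " "
            (List.map (fun c => PySem.Str.strip (PySem.List.pyGetD lines (c * q + min c rem + r) ""))
              (PySem.List.pyRange 0 (if r < q then nc else rem) 1))])
        [] (PySem.List.pyRange 0 (q + if rem ≠ 0 then 1 else 0) 1)) := by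
  have hNC : ((nc.toNat : Nat) : Int) = nc := by omega
  set NC := nc.toNat with hNCdef
  rw [← hNC, pvFoldA lines q rem hrem0 NC]
  -- per-column facts
  have hjbound : ∀ j : Nat, j < NC → 0 ≤ (j:Int)*q + min (j:Int) rem ∧
      ((j:Int)+1)*q + min ((j:Int)+1) rem ≤ (lines.length:Int) ∧
      (j:Int)*q + min (j:Int) rem ≤ ((j:Int)+1)*q + min ((j:Int)+1) rem := by
    intro j hj
    have hjc : (j:Int) + 1 ≤ nc := by omega
    have hm1 : ((j:Int)+1)*q ≤ nc*q := mul_le_mul_of_nonneg_right hjc hq0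
    have hm2 : nc*q = q*nc := mul_comm _ _
    have hm3 : ((j:Int)+1)*q = (j:Int)*q + q := by ring
    have hm4 : 0 ≤ (j:Int)*q := mul_nonneg (by positivity) hq0
    refine ⟨by omega, by omega, by omega⟩
  have hlenval : ∀ j : Nat, j < NC →
      (((PySem.List.slice lines (some ((j : Int) * q + min (j : Int) rem))
        (some (((j : Int) + 1) * q + min ((j : Int) + 1) rem))).length : Int))
        = q + (if (j:Int) < rem then 1 else 0) := by
    intro j hj
    obtain ⟨hb1, hb2, hb3⟩ := hjbound j hj
    have hm3 : ((j:Int)+1)*q = (j:Int)*q + q := by ring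
    rw [PySem.List.slice_toNat lines hb1 (by omega)]
    simp only [List.length_take, List.length_drop]
    split_ifs with hite
    · omega
    · omega
  -- the .1 projection and the sizes list
  simp only
  have hsizes : List.map (fun col => (col.length : Int))
      ((List.range NC).map (fun (j : Nat) =>
        PySem.List.slice lines (some ((j : Int) * q + min (j : Int) rem))
          (some (((j : Int) + 1) * q + min ((j : Int) + 1) rem))))
      = (List.range NC).map (fun (j : Nat) => q + (if (j:Int) < rem then 1 else 0)) := by
    rw [List.map_map]
    refine List.map_eq_map_iff.mpr ?_
    intro j hj
    simp only [Function.comp_apply]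
    exact hlenval j (by simpa using hj)
  rw [hsizes]
  -- the max over the sizes is q + (1 if rem else 0)
  have hmax : (PySem.List.max?
      ((List.range NC).map (fun (j : Nat) => q + (if (j:Int) < rem then 1 else 0)))
      (fun x => x)).getD 0 = q + (if rem ≠ 0 then 1 else 0) := by
    have hNCpos : 0 < NC := by omega
    obtain ⟨m, hm⟩ : ∃ m, PySem.List.max?
        ((List.range NC).map (fun (j : Nat) => q + (if (j:Int) < rem then 1 else 0)))
        (fun x => x) = some m := by
      cases h : PySem.List.max?
          ((List.range NC).map (fun (j : Nat) => q + (if (j:Int) < rem then 1 else 0)))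
          (fun x => x) with
      | none =>
        exfalso
        have := (PySem.List.max?_eq_none_iff _ _).mp h
        simp [List.range_eq_nil] at this
        omega
      | some m => exact ⟨m, rfl⟩
    have hmem := PySem.List.max?_mem hm
    have hub := PySem.List.max?_isMax hm
    rw [hm, Option.getD_some]
    obtain ⟨j, hj, hjv⟩ := List.mem_map.mp hmem
    have hMmem : (q + (if rem ≠ 0 then 1 else 0)) ∈
        (List.range NC).map (fun (j : Nat) => q + (if (j:Int) < rem then 1 else 0)) := by
      refine List.mem_map.mpr ⟨0, by simpa using hNCpos, ?_⟩
      push_cast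
      split_ifs <;> omega
    have h1 := hub _ hMmem
    have h2 : m ≤ q + (if rem ≠ 0 then 1 else 0) := by
      rw [← hjv]
      split_ifs <;> omega
    simp only at h1
    omega
  rw [hmax]
  rw [PySem.List.foldl_append_singleton_eq_map
        (fun row_idx => PySem.Str.join " "
          (List.map (fun col => PySem.Str.strip (PySem.List.pyGetD col row_idx ""))
            (List.filter (fun col => decide (row_idx < (col.length : Int)))
              ((List.range NC).map (fun (j : Nat) =>
                PySem.List.slice lines (some ((j : Int) * q + min (j : Int) rem))
                  (some (((j : Int) + 1) * q + min ((j : Int) + 1) rem))))))),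
      PySem.List.foldl_append_singleton_eq_map
        (fun r => PySem.Str.join " "
          (List.map (fun c => PySem.Str.strip (PySem.List.pyGetD lines (c * q + min c rem + r) ""))
            (PySem.List.pyRange 0 (if r < q then ↑NC else rem) 1)))]
  congr 1
  refine List.map_eq_map_iff.mpr ?_
  intro r hr
  rw [PySem.List.mem_pyRange_one] at hr
  obtain ⟨hr0, hrM⟩ := hr
  have hK0 : (0:Int) ≤ (if r < q then (NC:Int) else rem) := by split_ifs <;> omega
  have hKn : (((if r < q then (NC:Int) else rem).toNat : Nat) : Int)
      = (if r < q then (NC:Int) else rem) := Int.toNat_of_nonneg hK0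
  have hKle : (if r < q then (NC:Int) else rem).toNat ≤ NC := by
    split_ifs at hKn ⊢ <;> omega
  have hKiff : ∀ j : Nat, j < NC →
      (r < q + (if (j:Int) < rem then 1 else 0) ↔ (j:Int) < (if r < q then (NC:Int) else rem)) := by
    intro j hj
    split_ifs at hrM ⊢ <;> omega
  have hfilt : List.filter (fun col => decide (r < (col.length : Int)))
      ((List.range NC).map (fun (j : Nat) =>
        PySem.List.slice lines (some ((j : Int) * q + min (j : Int) rem))
          (some (((j : Int) + 1) * q + min ((j : Int) + 1) rem))))
      = (List.range ((if r < q then (NC:Int) else rem).toNat)).map (fun (j : Nat) =>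
        PySem.List.slice lines (some ((j : Int) * q + min (j : Int) rem))
          (some (((j : Int) + 1) * q + min ((j : Int) + 1) rem))) := by
    rw [List.filter_map,
        List.filter_congr (q := fun (j : Nat) => decide (j < (if r < q then (NC:Int) else rem).toNat))
          (by
            intro j hj
            simp only [Function.comp_apply, decide_eq_decide]
            rw [hlenval j (by simpa using hj)]
            rw [hKiff j (by simpa using hj)]
            omega),
        pvFiltRange NC _ hKle]
  rw [hfilt]
  rw [← hKn, PySem.List.pyRange_zero_natCast, List.map_map, List.map_map]
  simp only [Int.toNat_natCast]
  congr 1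
  refine List.map_eq_map_iff.mpr ?_
  intro j hj
  simp only [Function.comp_apply]
  have hjKn : j < (if r < q then (NC:Int) else rem).toNat := by simpa using hj
  have hjNC : j < NC := lt_of_lt_of_le hjKn hKle
  obtain ⟨hb1, hb2, hb3⟩ := hjbound j hjNC
  have hsiz : r < q + (if (j:Int) < rem then 1 else 0) :=
    (hKiff j hjNC).mpr (by omega)
  have hm3 : ((j:Int)+1)*q = (j:Int)*q + q := by ring
  have hminj : min ((j : Int) + 1) rem = min (j:Int) rem + (if (j:Int) < rem then 1 else 0) := by
    split_ifs <;> omega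
  congr 1
  have hlenj := hlenval j hjNC
  rw [PySem.List.pyGetD_eq_getElem _ _ hr0 (by omega),
      PySem.List.pyGetD_eq_getElem _ _ (by omega) (by split_ifs at hsiz hminj <;> omega)]
  simp only [PySem.List.slice_toNat lines hb1
      (show (0:Int) ≤ ((j:Int)+1)*q + min ((j:Int)+1) rem by omega),
    List.getElem_take, List.getElem_drop]
  simp only [show ((j:Int)*q + min (j:Int) rem).toNat + r.toNat
      = ((j:Int)*q + min (j:Int) rem + r).toNat from by omega]


-- ===== VERDICT (by name: the statement is the Claim_ definition above) =====
theorem contaminate_section_spec : Claim_equal_contaminate_section := by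
  intro lines num_cols _
  unfold Spec_contaminate_section
  unfold contaminate_section contaminate_section_alt
  by_cases h1 : num_cols ≤ 1
  · simp only [if_pos h1]
  · simp only [if_neg h1, PySem.List.len_eq]
    have hnum_colspos : (0:Int) < num_cols := by omega
    exact pvCore lines num_cols _ _ (by omega)
      (by rw [PySem.Int.floordiv_eq_ediv_of_pos hnum_colspos]; exact Int.ediv_nonneg (by positivity) (by omega))
      (PySem.Int.mod_nonneg _ hnum_colspos) (PySem.Int.mod_lt _ hnum_colspos)
      (PySem.Int.floordiv_mul_add_mod _ _)
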